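-- pv_equiv track=rewrite | github.com/RIKEN-RCCS/OpenFold-for-Fugaku | run_pretrained_openfold_multi.py | make_uniq_seq_groups
-- ===== SOURCE A (Python) =====
-- def make_uniq_seq_groups(input_seqs, input_chains):
--     assert len(input_seqs) == len(input_chains)
--     assert len(input_chains) == len(set(input_chains)) # Chain IDs must be unique
--
--     dic = {}
--     for seq, chain in zip(input_seqs, input_chains):
--         if seq not in dic.keys():
--             dic[seq] = []
--
--         dic[seq].append(chain)
--
--     for k in dic.keys():
--         dic[k] = sorted(dic[k])
--
--     items = list(dic.items())
--
--     # items must be inter-process consistent as it is divided by processes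
--     items = sorted(items, key=lambda x: x[1])
--
--     return [x[0] for x in items], [x[1] for x in items]
-- ===== SOURCE B (Python) =====
-- def make_uniq_seq_groups(input_seqs, input_chains):
--     assert len(input_seqs) == len(input_chains)
--     assert len(input_chains) == len(set(input_chains)) # Chain IDs must be unique
--
--     pairs = list(zip(input_seqs, input_chains))
--     items = [(s, sorted(c for s2, c in pairs if s2 == s))
--              for s in dict.fromkeys(input_seqs)]
--     items.sort(key=lambda x: x[1])
--     return [x[0] for x in items], [x[1] for x in items]
-- ===== Notes on version B (the rewrite author's own statement) =====
-- stated objective: simpler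
-- what changed: Replaces the dict-accumulate-then-sort-each-group passes with a direct comprehension: for each first-occurrence-deduplicated sequence, collect its chains by filtering the zipped pairs and sort them, so no dict is built or rewritten in place.
import Mathlib
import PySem

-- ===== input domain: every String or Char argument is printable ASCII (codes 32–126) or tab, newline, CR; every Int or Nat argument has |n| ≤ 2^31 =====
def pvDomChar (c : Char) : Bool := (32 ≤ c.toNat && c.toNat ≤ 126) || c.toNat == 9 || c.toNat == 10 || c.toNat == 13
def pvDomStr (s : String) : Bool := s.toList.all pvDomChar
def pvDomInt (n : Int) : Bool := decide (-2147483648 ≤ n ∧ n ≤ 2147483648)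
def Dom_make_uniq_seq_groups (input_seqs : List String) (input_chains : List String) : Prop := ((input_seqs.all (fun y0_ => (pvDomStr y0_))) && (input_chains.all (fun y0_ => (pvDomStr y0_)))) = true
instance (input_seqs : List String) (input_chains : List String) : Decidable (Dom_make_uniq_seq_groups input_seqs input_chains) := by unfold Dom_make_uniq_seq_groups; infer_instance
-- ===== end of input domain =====

-- B replaces A's dict-accumulation + per-group sorting passes by a direct comprehension over the
-- deduplicated sequences, filtering the zipped pairs per sequence (simpler decomposition, no dict).


-- ===== PORT A =====
def make_uniq_seq_groups (input_seqs : List String) (input_chains : List String) : List String × List (List String) :=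
  -- dic = {}; for seq, chain in zip(...): if seq not in dic.keys(): dic[seq] = []; dic[seq].append(chain)
  let dic := (input_seqs.zip input_chains).foldl
    (fun d p => (if d.contains p.1 then d else d.insert p.1 ([] : List String)).modify p.1 [] (fun l => l ++ [p.2]))
    PySem.Dict.empty
  -- for k in dic.keys(): dic[k] = sorted(dic[k])
  let dic2 := dic.keys.foldl (fun d k => d.insert k (PySem.List.sorted (d.getD k []) (fun c => c) false)) dic
  -- items = sorted(list(dic.items()), key=lambda x: x[1])
  let items := PySem.List.sorted dic2.items (fun x => x.2) false
  (items.map (fun x => x.1), items.map (fun x => x.2))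

-- ===== PORT B =====
def make_uniq_seq_groups_alt (input_seqs : List String) (input_chains : List String) : List String × List (List String) :=
  let pairs := input_seqs.zip input_chains
  -- [(s, sorted(c for s2, c in pairs if s2 == s)) for s in dict.fromkeys(input_seqs)]
  let items := (PySem.List.dedup input_seqs).map
    (fun s => (s, PySem.List.sorted ((pairs.filter (fun p => p.1 == s)).map (fun x => x.2)) (fun c => c) false))
  -- items.sort(key=lambda x: x[1])
  let items2 := PySem.List.sorted items (fun x => x.2) false
  (items2.map (fun x => x.1), items2.map (fun x => x.2))

-- ===== PRECONDITION & SPEC =====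
-- Pre_ excludes exactly the inputs on which A's two leading asserts raise AssertionError:
-- unequal lengths, or duplicate chain IDs.
def Pre_make_uniq_seq_groups (input_seqs : List String) (input_chains : List String) : Prop :=
  input_seqs.length = input_chains.length ∧ input_chains.Nodup
instance (input_seqs : List String) (input_chains : List String) : Decidable (Pre_make_uniq_seq_groups input_seqs input_chains) := by unfold Pre_make_uniq_seq_groups; infer_instance
def pvWitness_make_uniq_seq_groups : List String × List String := (["AA", "B", "AA"], ["c2", "c3", "c1"])

def Spec_make_uniq_seq_groups (input_seqs : List String) (input_chains : List String) (out : List String × List (List String)) : Prop := out = make_uniq_seq_groups_alt input_seqs input_chains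
instance (input_seqs : List String) (input_chains : List String) (out : List String × List (List String)) : Decidable (Spec_make_uniq_seq_groups input_seqs input_chains out) := by unfold Spec_make_uniq_seq_groups; infer_instance

-- ===== CLAIM (what is proved, stated in full; the proofs are below) =====
def Claim_equal_make_uniq_seq_groups : Prop := ∀ (input_seqs : List String) (input_chains : List String), Dom_make_uniq_seq_groups input_seqs input_chains → Pre_make_uniq_seq_groups input_seqs input_chains → Spec_make_uniq_seq_groups input_seqs input_chains (make_uniq_seq_groups input_seqs input_chains)

-- ===== LEMMAS AND PROOFS =====

-- A's accumulation step, named so the fold lemmas below can speak about it.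
def pvStepA (d : PySem.Dict String (List String)) (p : String × String) : PySem.Dict String (List String) :=
  (if d.contains p.1 then d else d.insert p.1 ([] : List String)).modify p.1 [] (fun l => l ++ [p.2])

theorem pvStepA_getD (d : PySem.Dict String (List String)) (p : String × String) (c : String) :
    (pvStepA d p).getD c [] = if p.1 == c then d.getD c [] ++ [p.2] else d.getD c [] := by
  unfold pvStepA
  by_cases h : d.contains p.1 = true
  · simp [h, PySem.Dict.getD_modify]
    by_cases hc : c = p.1
    · simp [hc]
    · simp [hc, Ne.symm hc]
  · simp [h, PySem.Dict.getD_modify, PySem.Dict.getD_insert]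
    by_cases hc : c = p.1
    · simp [hc, PySem.Dict.getD_of_not_contains d (k := p.1) [] (by simpa using h)]
    · simp [hc, Ne.symm hc]

theorem pvStepA_keys (d : PySem.Dict String (List String)) (p : String × String) :
    (pvStepA d p).keys = PySem.Set.add d.keys p.1 := by
  unfold pvStepA
  by_cases h : d.contains p.1 = true
  · rw [if_pos h, PySem.Dict.keys_modify, PySem.Dict.keys_insert_of_contains _ _ h,
      PySem.Set.add_of_mem]
    exact (PySem.Dict.contains_iff_mem_keys _ _).mp h
  · rw [if_neg h, PySem.Dict.keys_modify, PySem.Dict.keys_insert_of_contains,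
      PySem.Dict.keys_insert_of_not_contains _ _ (by simpa using h),
      PySem.Set.add_of_not_mem]
    · intro hm; exact h ((PySem.Dict.contains_iff_mem_keys _ _).mpr hm)
    · simp

-- A's first loop: each key's accumulated value is the chains of its pairs, in input order.
theorem pvFoldA_getD (l : List (String × String)) (d : PySem.Dict String (List String)) (c : String) :
    (l.foldl pvStepA d).getD c [] = d.getD c [] ++ (l.filter (fun p => p.1 == c)).map (fun x => x.2) := by
  induction l generalizing d with
  | nil => simp
  | cons p l ih =>
    simp only [List.foldl_cons, ih, pvStepA_getD, List.filter_cons]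
    by_cases h : p.1 = c <;> simp [h]

-- A's first loop: the keys are the distinct first components in first-insertion order.
theorem pvFoldA_keys (l : List (String × String)) (d : PySem.Dict String (List String)) :
    (l.foldl pvStepA d).keys = PySem.Set.update d.keys (l.map (fun p => p.1)) := by
  induction l generalizing d with
  | nil => simp [PySem.Set.update]
  | cons p l ih =>
    simp only [List.foldl_cons, ih, pvStepA_keys, List.map_cons, PySem.Set.update_cons]

-- A's second loop: rewriting each existing key's value in place maps g over the items list.
theorem pvPhase2_items (g : List String → List String) (ks : List String) (d : PySem.Dict String (List String))
    (hnd : d.keys.Nodup) (hks : ks.Nodup) (hsub : ∀ k ∈ ks, d.contains k = true) :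
    (ks.foldl (fun d k => d.insert k (g (d.getD k []))) d).items
      = d.items.map (fun p => if p.1 ∈ ks then (p.1, g p.2) else p) := by
  induction ks generalizing d with
  | nil => simp
  | cons k ks ih =>
    have hck : d.contains k = true := hsub k (by simp)
    have hkeys : (d.insert k (g (d.getD k []))).keys = d.keys := PySem.Dict.keys_insert_of_contains _ _ hck
    have hsub' : ∀ k' ∈ ks, (d.insert k (g (d.getD k []))).contains k' = true := by
      intro k' hk'
      have := hsub k' (by simp [hk'])
      rw [PySem.Dict.contains_iff_mem_keys] at this ⊢
      rw [hkeys]; exact this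
    rw [List.foldl_cons, ih _ (by rw [hkeys]; exact hnd) hks.of_cons hsub',
      PySem.Dict.items_insert_of_contains _ _ hck, List.map_map]
    refine List.map_congr_left ?_
    intro p hp
    have hkn : k ∉ ks := (List.nodup_cons.mp hks).1
    by_cases h : p.1 = k
    · have : d.getD k [] = p.2 := by
        have : (p.1, p.2) ∈ d.items := by simpa using hp
        rw [← h]; exact PySem.Dict.getD_of_mem_items _ this hnd []
      simp [Function.comp, h, hkn, this]
    · simp [Function.comp, h]

-- ===== VERDICT (by name: the statement is the Claim_ definition above) =====
theorem make_uniq_seq_groups_spec : Claim_equal_make_uniq_seq_groups := by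
  intro input_seqs input_chains _ hpre
  unfold Spec_make_uniq_seq_groups
  unfold make_uniq_seq_groups make_uniq_seq_groups_alt
  have hlen : input_seqs.length = input_chains.length := hpre.1
  have hstep : (fun (d : PySem.Dict String (List String)) (p : String × String) =>
      (if d.contains p.1 then d else d.insert p.1 ([] : List String)).modify p.1 [] (fun l => l ++ [p.2])) = pvStepA := rfl
  rw [hstep]
  set pairs := input_seqs.zip input_chains with hpairs
  set dic := pairs.foldl pvStepA PySem.Dict.empty with hdic
  have hfst : pairs.map (fun p => p.1) = input_seqs := by
    simpa using List.map_fst_zip (l₁ := input_seqs) (l₂ := input_chains) (le_of_eq hlen)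
  have hkeys : dic.keys = PySem.List.dedup input_seqs := by
    rw [hdic, pvFoldA_keys, PySem.Dict.keys_empty, PySem.Set.update_nil_left, hfst]
    simp
  have hnd : dic.keys.Nodup := by
    rw [hkeys]; exact PySem.List.nodup_dedup input_seqs
  have hgetD : ∀ c, dic.getD c [] = (pairs.filter (fun p => p.1 == c)).map (fun x => x.2) := by
    intro c; rw [hdic, pvFoldA_getD]; simp
  have hitems2 :
      (dic.keys.foldl (fun d k => d.insert k (PySem.List.sorted (d.getD k []) (fun c => c) false)) dic).items
        = (PySem.List.dedup input_seqs).map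
            (fun s => (s, PySem.List.sorted ((pairs.filter (fun p => p.1 == s)).map (fun x => x.2)) (fun c => c) false)) := by
    rw [pvPhase2_items (fun v => PySem.List.sorted v (fun c => c) false) _ _ hnd hnd
        (fun k hk => (PySem.Dict.contains_iff_mem_keys _ _).mpr hk),
      PySem.Dict.items_eq_map_keys dic hnd [], List.map_map, hkeys]
    refine List.map_congr_left ?_
    intro s hs
    have hsin : s ∈ input_seqs := by simpa [PySem.List.mem_dedup] using hs
    simp [Function.comp, hsin, hgetD s]
  simp only [hitems2]
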